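-- pv_equiv track=rewrite | github.com/hsuetsugu/atc | ABC142/D.py | enumerate_prime
-- ===== SOURCE A (Python) =====
-- def enumerate_prime(n: int) -> (list, dict, list):
--     """
--     n以下の素数を列挙する
--     何で割るかを記録しておくことで、素因数分解が高速にできる
--     >>> p = Mint()
--     >>> p.enumerate_prime(11)
--     ([2, 3, 5, 7, 11], {2: 0, 3: 1, 5: 2, 7: 3, 11: 4}, [0, 1, 2, 3, 2, 5, 3, 7, 2, 3, 5, 11])
--     """
--
--     lis_prime = [True] * (n+1)
--     lis_prime[0] = False
--     lis_prime[1] = False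
--
--     primes = []
--     div_prime = [i for i in range(n + 1)]
--     primes_idx = {}
--
--     cnt = 0
--     for i in range(2, n+1):
--         if lis_prime[i]:
--             primes.append(i)
--             primes_idx[i] = cnt
--             cnt += 1
--
--             j = 2 * i
--             while True:
--                 if j > n:
--                     break
--                 lis_prime[j] = False
--                 div_prime[j] = i
--                 j += i
--
--     return primes, primes_idx, div_prime
-- ===== SOURCE B (Python) =====
-- def enumerate_prime(n: int) -> (list, dict, list):
--     # Different decomposition than A: a smallest-prime-factor sieve (conditional
--     # marking starting at i*i, first writer wins), primality read off as spf[i]==i,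
--     # and the largest prime factor recovered per element by dividing out spf factors.
--     N = n + 1 if n >= 0 else 0
--     spf = list(range(N))
--     primes = []
--     primes_idx = {}
--     for i in range(2, N):
--         if spf[i] == i:
--             primes_idx[i] = len(primes)
--             primes.append(i)
--             for j in range(i * i, N, i):
--                 if spf[j] == j:
--                     spf[j] = i
--
--     def largest_pf(j):
--         m = j
--         last = 0
--         while m > 1:
--             last = spf[m]
--             m //= last
--         return last
--
--     div_prime = [j if j < 2 else largest_pf(j) for j in range(N)]
--     return primes, primes_idx, div_prime
-- ===== Notes on version B (the rewrite author's own statement) =====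
-- stated objective: alternative
-- what changed: A marks every multiple of each prime from 2i unconditionally so the last writer leaves the largest prime factor in div_prime; B instead builds a smallest-prime-factor table (conditional first-writer marking starting at i*i, primality read off as spf[i]==i) and recovers each largest prime factor afterwards by dividing out spf factors.
-- crash fix: For every n ≤ 0 A raises IndexError (its boolean sieve list is too short to assign the first two sentinel entries) while B returns the natural empty answer: empty primes and index, and div_prime covering just range(n+1). — e.g. on enumerate_prime(0): A raises IndexError, B returns ([], [], [0])
import Mathlib
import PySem

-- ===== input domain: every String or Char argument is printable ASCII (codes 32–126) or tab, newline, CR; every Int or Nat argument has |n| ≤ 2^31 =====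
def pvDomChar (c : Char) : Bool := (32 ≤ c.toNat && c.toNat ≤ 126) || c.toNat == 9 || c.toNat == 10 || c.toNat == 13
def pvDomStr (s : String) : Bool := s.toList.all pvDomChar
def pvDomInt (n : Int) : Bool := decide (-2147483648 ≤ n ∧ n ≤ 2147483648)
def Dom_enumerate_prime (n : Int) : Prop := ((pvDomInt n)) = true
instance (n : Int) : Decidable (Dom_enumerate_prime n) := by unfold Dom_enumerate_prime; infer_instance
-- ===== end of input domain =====

/-
  B replaces A's destructive multiple-marking sieve (unconditional overwrite from 2*i,
  last writer = largest prime factor) by a smallest-prime-factor sieve (conditional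
  first-writer marking from i*i) plus, per element, recovery of the largest prime
  factor by dividing out spf factors (objective: alternative, not claimed faster).
  A raises IndexError for n < 1 (excluded by Pre_; B returns there, see Raises_).
  The dict `primes_idx` is ported as an association list; every `primes_idx[i] = …`
  adds a fresh key (keys strictly increase), so it is an append.
-/


-- ===== PORT A =====
abbrev epSt := List Bool × List Int × List (Int × Int) × List Int × Int

-- the inner `while True: … j += i` marking loop; fuel only makes the recursion total
-- (every call site passes enough fuel for the loop to run to its `break`)
def epA_mark (fuel : Nat) (n i j : Nat) (lis : List Bool) (div : List Int) : List Bool × List Int :=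
  match fuel with
  | 0 => (lis, div)
  | f + 1 =>
    if j > n then (lis, div)
    else epA_mark f n i (j + i) (lis.set j false) (div.set j (i : Int))

-- one iteration of `for i in range(2, n+1)`; `lis.getD i false` is exact because
-- 2 ≤ i ≤ n < lis.length whenever this is reached under Pre_
def epA_step (n : Nat) (st : epSt) (i : Nat) : epSt :=
  match st with
  | (lis, primes, idx, div, cnt) =>
    if lis.getD i false then
      let md := epA_mark (n + 1) n i (2 * i) lis div
      (md.1, primes ++ [(i : Int)], idx ++ [((i : Int), cnt)], md.2, cnt + 1)
    else (lis, primes, idx, div, cnt)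

def enumerate_prime (n : Int) : List Int × (List (Int × Int)) × List Int :=
  let nn := n.toNat        -- exact for n ≥ 1 (Pre_); for n < 1 the Python raises IndexError
  let lis0 := ((List.replicate (nn + 1) true).set 0 false).set 1 false
  let div0 := (List.range (nn + 1)).map (Int.ofNat)
  let st := (List.range' 2 (nn - 1)).foldl (epA_step nn)
      (lis0, ([] : List Int), ([] : List (Int × Int)), div0, (0 : Int))
  (st.2.1, st.2.2.1, st.2.2.2.1)

-- ===== PORT B =====
-- `for j in range(i*i, N, i): if spf[j] == j: spf[j] = i` (fuel = totality guard)
def epB_sieveMark (fuel : Nat) (i j N : Nat) (spf : List Nat) : List Nat :=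
  match fuel with
  | 0 => spf
  | f + 1 =>
    if j < N then
      epB_sieveMark f i (j + i) N (if spf.getD j 0 = j then spf.set j i else spf)
    else spf

-- one iteration of Source B's `for i in range(2, N)`; `spf.getD i 0` is exact: i < N = len(spf)
def epB_step (N : Nat) (st : List Nat × List Int × List (Int × Int)) (i : Nat) :
    List Nat × List Int × List (Int × Int) :=
  match st with
  | (spf, primes, idx) =>
    if spf.getD i 0 = i then
      (epB_sieveMark N i (i * i) N spf, primes ++ [(i : Int)],
        idx ++ [((i : Int), (primes.length : Int))])
    else (spf, primes, idx)

-- `m = j; while m > 1: last = spf[m]; m //= last; return last` of Source B's largest_pf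
def epB_lastLoop (fuel : Nat) (spf : List Nat) (m last : Nat) : Nat :=
  match fuel with
  | 0 => last
  | f + 1 =>
    if 1 < m then epB_lastLoop f spf (m / spf.getD m 0) (spf.getD m 0) else last

def enumerate_prime_alt (n : Int) : List Int × (List (Int × Int)) × List Int :=
  let N := (n + 1).toNat   -- = (n + 1 if n >= 0 else 0)
  let st := (List.range' 2 (N - 2)).foldl (epB_step N)
      (List.range N, ([] : List Int), ([] : List (Int × Int)))
  let div := (List.range N).map
      (fun (j : Nat) => if j < 2 then (j : Int) else ((epB_lastLoop j st.1 j 0 : Nat) : Int))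
  (st.2.1, st.2.2, div)

-- ===== PRECONDITION & SPEC =====
-- Python A evaluates lis_prime[1] (and, in comprehension-free form, lis_prime[0]) on a
-- list of length n+1, so it raises IndexError exactly when n < 1.
def Pre_enumerate_prime (n : Int) : Prop := 1 ≤ n
instance (n : Int) : Decidable (Pre_enumerate_prime n) := by unfold Pre_enumerate_prime; infer_instance
def pvWitness_enumerate_prime : Int := 11

-- On every n ≤ 0 A raises IndexError while B returns the natural empty answer.
def Raises_enumerate_prime (n : Int) : Prop := n < 1
instance (n : Int) : Decidable (Raises_enumerate_prime n) := by unfold Raises_enumerate_prime; infer_instance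
def pvRaiseWitness_enumerate_prime : Int := 0
def pvRaiseWitnessOut_enumerate_prime : List Int × (List (Int × Int)) × List Int := ([], [], [0])

def Spec_enumerate_prime (n : Int) (out : List Int × (List (Int × Int)) × List Int) : Prop := out = enumerate_prime_alt n
instance (n : Int) (out : List Int × (List (Int × Int)) × List Int) : Decidable (Spec_enumerate_prime n out) := by unfold Spec_enumerate_prime; infer_instance

-- ===== CLAIM (what is proved, stated in full; the proofs are below) =====
def Claim_equal_enumerate_prime : Prop := ∀ (n : Int), Dom_enumerate_prime n → Pre_enumerate_prime n → Spec_enumerate_prime n (enumerate_prime n)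
def Claim_raises_enumerate_prime : Prop := (∀ (n : Int), Dom_enumerate_prime n → Raises_enumerate_prime n → ¬ Pre_enumerate_prime n) ∧ (Dom_enumerate_prime (pvRaiseWitness_enumerate_prime) ∧ Raises_enumerate_prime (pvRaiseWitness_enumerate_prime) ∧ enumerate_prime_alt (pvRaiseWitness_enumerate_prime) = pvRaiseWitnessOut_enumerate_prime)

-- ===== LEMMAS AND PROOFS =====

-- what A's boolean array holds after processing all i < k
def epLisSpec (k m : Nat) : Bool := decide (2 ≤ m ∧ ∀ p, p < k → p.Prime → ¬(p ∣ m ∧ p < m))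

-- what A's div_prime[j] holds after processing all i < k: the largest prime proper
-- divisor of j below k if one exists, else j itself
def epMaxPPF (k j v : Nat) : Prop :=
  (v.Prime ∧ v ∣ j ∧ v < j ∧ v < k ∧ ∀ p, p < k → p.Prime → p ∣ j → p < j → p ≤ v) ∨
  (v = j ∧ ∀ p, p < k → p.Prime → ¬(p ∣ j ∧ p < j))

-- "r is the largest prime factor of j"
def epMPF (j r : Nat) : Prop := r.Prime ∧ r ∣ j ∧ ∀ p, p.Prime → p ∣ j → p ≤ r

def epPrimesUpto (t : Nat) : List Nat := (List.range' 2 t).filter (fun i => decide (Nat.Prime i))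

def epIdx (l : List Nat) : List (Int × Int) := l.zipIdx.map (fun pk => ((pk.1 : Int), (pk.2 : Int)))

def epInv (nn k : Nat) (st : epSt) : Prop :=
  st.1.length = nn + 1 ∧
  (∀ m, m ≤ nn → st.1[m]? = some (epLisSpec k m)) ∧
  st.2.1 = (epPrimesUpto (k - 2)).map Int.ofNat ∧
  st.2.2.1 = epIdx (epPrimesUpto (k - 2)) ∧
  st.2.2.2.1.length = nn + 1 ∧
  (∀ j, j ≤ nn → ∃ v : Nat, st.2.2.2.1[j]? = some ((v : Nat) : Int) ∧ epMaxPPF k j v) ∧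
  st.2.2.2.2 = ((epPrimesUpto (k - 2)).length : Int)

theorem epA_mark_spec (fuel : Nat) : ∀ (n i j : Nat) (lis : List Bool) (div : List Int),
    1 ≤ i → n + 2 ≤ fuel + j →
    (epA_mark fuel n i j lis div).1.length = lis.length ∧
    (epA_mark fuel n i j lis div).2.length = div.length ∧
    (∀ m, (epA_mark fuel n i j lis div).1[m]? =
      if j ≤ m ∧ m ≤ n ∧ i ∣ (m - j) then lis[m]?.map (fun _ => false) else lis[m]?) ∧
    (∀ m, (epA_mark fuel n i j lis div).2[m]? =
      if j ≤ m ∧ m ≤ n ∧ i ∣ (m - j) then div[m]?.map (fun _ => (i : Int)) else div[m]?) := by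
  induction fuel with
  | zero =>
    intro n i j lis div hi hb
    refine ⟨rfl, rfl, fun m => ?_, fun m => ?_⟩ <;>
      (rw [if_neg (by rintro ⟨h1, h2, _⟩; omega)]; rfl)
  | succ f ih =>
    intro n i j lis div hi hb
    by_cases hj : j > n
    · have he : epA_mark (f + 1) n i j lis div = (lis, div) := by
        simp only [epA_mark]; rw [if_pos hj]
      rw [he]
      refine ⟨rfl, rfl, fun m => ?_, fun m => ?_⟩ <;>
        rw [if_neg (by rintro ⟨h1, h2, _⟩; omega)]
    · have he : epA_mark (f + 1) n i j lis div =
          epA_mark f n i (j + i) (lis.set j false) (div.set j (i : Int)) := by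
        simp only [epA_mark]; rw [if_neg hj]
      rw [he]
      obtain ⟨ihl1, ihl2, ihg1, ihg2⟩ :=
        ih n i (j + i) (lis.set j false) (div.set j (i : Int)) hi (by omega)
      have hcond : ∀ m, m ≠ j →
          ((j ≤ m ∧ m ≤ n ∧ i ∣ (m - j)) ↔ (j + i ≤ m ∧ m ≤ n ∧ i ∣ (m - (j + i)))) := by
        intro m hm
        constructor
        · rintro ⟨h1, h2, h3⟩
          have hge : i ≤ m - j := Nat.le_of_dvd (by omega) h3
          refine ⟨by omega, h2, ?_⟩
          have heq : m - (j + i) = (m - j) - i := by omega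
          rw [heq]
          exact Nat.dvd_sub h3 dvd_rfl
        · rintro ⟨h1, h2, h3⟩
          refine ⟨by omega, h2, ?_⟩
          have heq : m - j = (m - (j + i)) + i := by omega
          rw [heq]
          exact Nat.dvd_add h3 dvd_rfl
      refine ⟨by rw [ihl1]; simp, by rw [ihl2]; simp, fun m => ?_, fun m => ?_⟩
      · rw [ihg1 m]
        by_cases hm : m = j
        · have hL : ¬ (j + i ≤ m ∧ m ≤ n ∧ i ∣ m - (j + i)) := by rintro ⟨h1, _, _⟩; omega
          have hR : j ≤ m ∧ m ≤ n ∧ i ∣ m - j := ⟨by omega, by omega, by simp [hm]⟩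
          have hset : (lis.set j false)[m]? = lis[m]?.map (fun _ => false) := by
            rw [List.getElem?_set, if_pos hm.symm]
            by_cases hlen : j < lis.length
            · rw [if_pos hlen, hm, List.getElem?_eq_getElem hlen]; rfl
            · rw [if_neg hlen, hm, List.getElem?_eq_none (by omega)]; rfl
          rw [hset, if_neg hL, if_pos hR]
        · have hset : (lis.set j false)[m]? = lis[m]? := by
            rw [List.getElem?_set, if_neg (show ¬ j = m from fun h => hm h.symm)]
          rw [hset]
          by_cases hc : j ≤ m ∧ m ≤ n ∧ i ∣ (m - j)
          · rw [if_pos ((hcond m hm).mp hc), if_pos hc]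
          · rw [if_neg (fun h => hc ((hcond m hm).mpr h)), if_neg hc]
      · rw [ihg2 m]
        by_cases hm : m = j
        · have hL : ¬ (j + i ≤ m ∧ m ≤ n ∧ i ∣ m - (j + i)) := by rintro ⟨h1, _, _⟩; omega
          have hR : j ≤ m ∧ m ≤ n ∧ i ∣ m - j := ⟨by omega, by omega, by simp [hm]⟩
          have hset : (div.set j (i : Int))[m]? = div[m]?.map (fun _ => (i : Int)) := by
            rw [List.getElem?_set, if_pos hm.symm]
            by_cases hlen : j < div.length
            · rw [if_pos hlen, hm, List.getElem?_eq_getElem hlen]; rfl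
            · rw [if_neg hlen, hm, List.getElem?_eq_none (by omega)]; rfl
          rw [hset, if_neg hL, if_pos hR]
        · have hset : (div.set j (i : Int))[m]? = div[m]? := by
            rw [List.getElem?_set, if_neg (show ¬ j = m from fun h => hm h.symm)]
          rw [hset]
          by_cases hc : j ≤ m ∧ m ≤ n ∧ i ∣ (m - j)
          · rw [if_pos ((hcond m hm).mp hc), if_pos hc]
          · rw [if_neg (fun h => hc ((hcond m hm).mpr h)), if_neg hc]

theorem notPrime_exists {j : Nat} (h2 : 2 ≤ j) (hnp : ¬ j.Prime) :
    ∃ p, p.Prime ∧ p ∣ j ∧ p < j := by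
  obtain ⟨p, hp, hdvd⟩ := Nat.exists_prime_and_dvd (by omega : j ≠ 1)
  refine ⟨p, hp, hdvd, ?_⟩
  rcases lt_or_eq_of_le (Nat.le_of_dvd (by omega) hdvd) with h | h
  · exact h
  · exact absurd (h ▸ hp) hnp

theorem two_mul_le_of_dvd_lt {k m : Nat} (hd : k ∣ m) (hlt : k < m) : 2 * k ≤ m := by
  obtain ⟨q, rfl⟩ := hd
  rcases q with _ | _ | q
  · omega
  · omega
  · nlinarith

theorem epLisSpec_self {k : Nat} (h2 : 2 ≤ k) : epLisSpec k k = decide (Nat.Prime k) := by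
  simp only [epLisSpec, decide_eq_decide]
  constructor
  · rintro ⟨h2k, hall⟩
    by_contra hnp
    obtain ⟨p, hp, hdvd, hplt⟩ := notPrime_exists h2k hnp
    exact hall p hplt hp ⟨hdvd, hplt⟩
  · intro hq
    refine ⟨hq.two_le, fun p hplt hp ⟨hdvd, hlt2⟩ => ?_⟩
    rcases hq.eq_one_or_self_of_dvd p hdvd with h | h
    · have := hp.two_le; omega
    · omega

theorem epLisSpec_succ_marked {k m : Nat} (hp : k.Prime) (hd : k ∣ m) (hm : 2 * k ≤ m) :
    epLisSpec (k + 1) m = false := by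
  simp only [epLisSpec, decide_eq_false_iff_not]
  rintro ⟨h2m, hall⟩
  exact hall k (by omega) hp ⟨hd, by have := hp.two_le; omega⟩

theorem epLisSpec_succ_unmarked {k m : Nat} (h : ¬(k ∣ m ∧ 2 * k ≤ m)) :
    epLisSpec (k + 1) m = epLisSpec k m := by
  simp only [epLisSpec, decide_eq_decide]
  constructor
  · rintro ⟨h2m, hall⟩
    exact ⟨h2m, fun p hplt hp hpm => hall p (by omega) hp hpm⟩
  · rintro ⟨h2m, hall⟩
    refine ⟨h2m, fun p hplt hp hpm => ?_⟩
    by_cases hpk : p = k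
    · subst hpk
      exact h ⟨hpm.1, two_mul_le_of_dvd_lt hpm.1 hpm.2⟩
    · exact hall p (by omega) hp hpm

theorem epLisSpec_succ_notprime {k m : Nat} (h : ¬ k.Prime) :
    epLisSpec (k + 1) m = epLisSpec k m := by
  simp only [epLisSpec, decide_eq_decide]
  constructor
  · rintro ⟨h2m, hall⟩
    exact ⟨h2m, fun p hplt hp hpm => hall p (by omega) hp hpm⟩
  · rintro ⟨h2m, hall⟩
    refine ⟨h2m, fun p hplt hp hpm => ?_⟩
    by_cases hpk : p = k
    · exact absurd (hpk ▸ hp) h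
    · exact hall p (by omega) hp hpm

theorem epMaxPPF_succ_marked {k j : Nat} (hp : k.Prime) (hd : k ∣ j) (hj : 2 * k ≤ j) :
    epMaxPPF (k + 1) j k := by
  exact Or.inl ⟨hp, hd, by have := hp.two_le; omega, by omega,
    fun p hplt _ _ _ => by omega⟩

theorem epMaxPPF_succ_unmarked {k j v : Nat} (h : ¬(k ∣ j ∧ 2 * k ≤ j))
    (hv : epMaxPPF k j v) : epMaxPPF (k + 1) j v := by
  rcases hv with ⟨hvp, hvd, hvj, hvk, hmax⟩ | ⟨rfl, hnone⟩
  · refine Or.inl ⟨hvp, hvd, hvj, by omega, fun p hplt hp hpd hpj => ?_⟩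
    by_cases hpk : p = k
    · subst hpk; exact absurd ⟨hpd, two_mul_le_of_dvd_lt hpd hpj⟩ h
    · exact hmax p (by omega) hp hpd hpj
  · refine Or.inr ⟨rfl, fun p hplt hp hc => ?_⟩
    by_cases hpk : p = k
    · subst hpk; exact h ⟨hc.1, two_mul_le_of_dvd_lt hc.1 hc.2⟩
    · exact hnone p (by omega) hp hc

theorem epMaxPPF_succ_notprime {k j v : Nat} (h : ¬ k.Prime)
    (hv : epMaxPPF k j v) : epMaxPPF (k + 1) j v := by
  rcases hv with ⟨hvp, hvd, hvj, hvk, hmax⟩ | ⟨rfl, hnone⟩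
  · refine Or.inl ⟨hvp, hvd, hvj, by omega, fun p hplt hp hpd hpj => ?_⟩
    by_cases hpk : p = k
    · exact absurd (hpk ▸ hp) h
    · exact hmax p (by omega) hp hpd hpj
  · refine Or.inr ⟨rfl, fun p hplt hp hc => ?_⟩
    by_cases hpk : p = k
    · exact absurd (hpk ▸ hp) h
    · exact hnone p (by omega) hp hc

theorem epIdx_append (l : List Nat) (a : Nat) :
    epIdx (l ++ [a]) = epIdx l ++ [((a : Int), (l.length : Int))] := by
  unfold epIdx
  rw [List.zipIdx_append]
  simp [List.zipIdx]

theorem epPrimesUpto_succ {k : Nat} (h2 : 2 ≤ k) :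
    epPrimesUpto (k - 1) =
      epPrimesUpto (k - 2) ++ (if Nat.Prime k then [k] else []) := by
  unfold epPrimesUpto
  have h1 : k - 1 = (k - 2) + 1 := by omega
  rw [h1, List.range'_concat, List.filter_append]
  have h3 : 2 + 1 * (k - 2) = k := by omega
  rw [h3]
  by_cases hkp : Nat.Prime k <;> simp [hkp]

theorem epA_step_inv {nn k : Nat} {st : epSt} (hinv : epInv nn k st)
    (h2 : 2 ≤ k) (hk : k ≤ nn) : epInv nn (k + 1) (epA_step nn st k) := by
  obtain ⟨lis, primes, idx, div, cnt⟩ := st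
  obtain ⟨hlen, hlis, hprimes, hidx, hdlen, hdiv, hcnt⟩ := hinv
  dsimp only at hlen hlis hprimes hidx hdlen hdiv hcnt
  have hguard : lis.getD k false = decide (Nat.Prime k) := by
    rw [List.getD_eq_getElem?_getD, hlis k hk, epLisSpec_self h2]; rfl
  have hksub : k + 1 - 2 = k - 1 := by omega
  by_cases hkp : Nat.Prime k
  · have hg : lis.getD k false = true := by rw [hguard]; simp [hkp]
    obtain ⟨hml1, hml2, hmg1, hmg2⟩ :=
      epA_mark_spec (nn + 1) nn k (2 * k) lis div (by omega) (by omega)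
    have hup : epPrimesUpto (k - 1) = epPrimesUpto (k - 2) ++ [k] := by
      rw [epPrimesUpto_succ h2, if_pos hkp]
    have hcnd : ∀ m, m ≤ nn → ((2 * k ≤ m ∧ m ≤ nn ∧ k ∣ m - 2 * k) ↔ (k ∣ m ∧ 2 * k ≤ m)) := by
      intro m hm
      constructor
      · rintro ⟨ha, hb, hc⟩
        refine ⟨?_, ha⟩
        have heq : m = (m - 2 * k) + 2 * k := by omega
        rw [heq]
        exact Nat.dvd_add hc (dvd_mul_left k 2)
      · rintro ⟨ha, hb⟩
        exact ⟨hb, hm, Nat.dvd_sub ha (dvd_mul_left k 2)⟩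
    simp only [epA_step, hg, if_true]
    unfold epInv
    dsimp only
    refine ⟨by rw [hml1, hlen], ?_, ?_, ?_, by rw [hml2, hdlen], ?_, ?_⟩
    · intro m hm
      rw [hmg1 m]
      by_cases hc : k ∣ m ∧ 2 * k ≤ m
      · rw [if_pos ((hcnd m hm).mpr hc), hlis m hm,
          epLisSpec_succ_marked hkp hc.1 hc.2]
        rfl
      · rw [if_neg (fun h => hc ((hcnd m hm).mp h)), hlis m hm,
          epLisSpec_succ_unmarked hc]
    · rw [hksub, hup, List.map_append, hprimes]; rfl
    · rw [hksub, hup, epIdx_append, hidx, hcnt]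
    · intro j hj
      rw [hmg2 j]
      obtain ⟨v, hv, hvp⟩ := hdiv j hj
      by_cases hc : k ∣ j ∧ 2 * k ≤ j
      · rw [if_pos ((hcnd j hj).mpr hc), hv]
        exact ⟨k, rfl, epMaxPPF_succ_marked hkp hc.1 hc.2⟩
      · rw [if_neg (fun h => hc ((hcnd j hj).mp h))]
        exact ⟨v, hv, epMaxPPF_succ_unmarked hc hvp⟩
    · rw [hksub, hup, hcnt]
      simp
  · have hg : lis.getD k false = false := by rw [hguard]; simp [hkp]
    have hup : epPrimesUpto (k - 1) = epPrimesUpto (k - 2) := by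
      rw [epPrimesUpto_succ h2, if_neg hkp, List.append_nil]
    simp only [epA_step, hg, Bool.false_eq_true, if_false]
    unfold epInv
    dsimp only
    refine ⟨hlen, ?_, by rw [hksub, hup]; exact hprimes, by rw [hksub, hup]; exact hidx,
      hdlen, ?_, by rw [hksub, hup]; exact hcnt⟩
    · intro m hm
      rw [hlis m hm, epLisSpec_succ_notprime hkp]
    · intro j hj
      obtain ⟨v, hv, hvp⟩ := hdiv j hj
      exact ⟨v, hv, epMaxPPF_succ_notprime hkp hvp⟩

theorem epA_fold_inv (nn : Nat) : ∀ (t : Nat), 2 + t ≤ nn + 1 →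
    epInv nn (2 + t) ((List.range' 2 t).foldl (epA_step nn)
      (((List.replicate (nn + 1) true).set 0 false).set 1 false, ([] : List Int),
        ([] : List (Int × Int)), (List.range (nn + 1)).map (Int.ofNat), (0 : Int))) := by
  intro t
  induction t with
  | zero =>
    intro _
    simp only [List.range', List.foldl_nil]
    have hspec : ∀ m, epLisSpec 2 m = decide (2 ≤ m) := by
      intro m
      simp only [epLisSpec, decide_eq_decide]
      constructor
      · exact fun h => h.1
      · intro h
        refine ⟨h, fun p hp hpp _ => ?_⟩
        rcases p with _ | _ | p
        · exact Nat.not_prime_zero hpp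
        · exact Nat.not_prime_one hpp
        · omega
    refine ⟨by simp, ?_, by simp [epPrimesUpto], by simp [epIdx, epPrimesUpto], by simp, ?_,
      by simp [epPrimesUpto]⟩
    · intro m hm
      dsimp only
      rw [hspec m]
      rcases m with _ | _ | m
      · rw [List.getElem?_set, if_neg (by omega), List.getElem?_set, if_pos rfl,
          if_pos (by simp)]
        rfl
      · rw [List.getElem?_set, if_pos rfl, if_pos (by simp; omega)]
        rfl
      · rw [List.getElem?_set, if_neg (by omega), List.getElem?_set, if_neg (by omega),
          List.getElem?_replicate, if_pos (by omega)]
        rfl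
    · intro j hj
      refine ⟨j, ?_, Or.inr ⟨rfl, fun p hp hpp hc => ?_⟩⟩
      · dsimp only
        rw [List.getElem?_map, List.getElem?_range (by omega)]
        rfl
      · rcases p with _ | _ | p
        · exact Nat.not_prime_zero hpp
        · exact Nat.not_prime_one hpp
        · omega
  | succ t ih =>
    intro ht
    have h1t : 2 + 1 * t = 2 + t := by omega
    rw [List.range'_concat, List.foldl_append, List.foldl_cons, List.foldl_nil, h1t]
    exact epA_step_inv (ih (by omega)) (show 2 ≤ 2 + t by omega) (show 2 + t ≤ nn by omega)

-- primality by trial division up to the square root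
-- what B's spf array holds after processing all i < k: the smallest prime factor,
-- once it has been processed (composite m, minFac m < k), else m untouched
def spfSpec (k m : Nat) : Nat :=
  if 2 ≤ m ∧ ¬ m.Prime ∧ m.minFac < k then m.minFac else m

theorem minFac_lt_of_composite {m : Nat} (h2 : 2 ≤ m) (hnp : ¬ m.Prime) : m.minFac < m := by
  rcases lt_or_eq_of_le (Nat.minFac_le (by omega : 0 < m)) with h | h
  · exact h
  · exact absurd (Nat.prime_def_minFac.mpr ⟨h2, h⟩) hnp

theorem spfSpec_fires {k m : Nat} (h : 2 ≤ m ∧ ¬ m.Prime ∧ m.minFac < k) :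
    spfSpec k m = m.minFac := if_pos h

theorem spfSpec_self_iff {k : Nat} (h2 : 2 ≤ k) : spfSpec k k = k ↔ k.Prime := by
  unfold spfSpec
  constructor
  · intro h
    by_contra hnp
    have hlt := minFac_lt_of_composite h2 hnp
    rw [if_pos ⟨h2, hnp, hlt⟩] at h
    omega
  · intro hp
    rw [if_neg (fun h => h.2.1 hp)]

theorem spfSpec_succ_marked {k m : Nat} (hk : 2 ≤ k) (hd : k ∣ m) (hsq : k * k ≤ m)
    (hself : spfSpec k m = m) : spfSpec (k + 1) m = k := by
  have h2m : 2 ≤ m := by nlinarith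
  have hnp : ¬ m.Prime := by
    intro hp
    rcases hp.eq_one_or_self_of_dvd k hd with h | h
    · omega
    · nlinarith
  have hle : m.minFac ≤ k := Nat.minFac_le_of_dvd hk hd
  have hge : ¬ m.minFac < k := by
    intro hlt
    rw [spfSpec_fires ⟨h2m, hnp, hlt⟩] at hself
    have := minFac_lt_of_composite h2m hnp
    omega
  have heq : m.minFac = k := by omega
  rw [spfSpec_fires ⟨h2m, hnp, by omega⟩, heq]

theorem spfSpec_succ_unmarked {k m : Nat} (hk : 2 ≤ k)
    (h : ¬(k ∣ m ∧ k * k ≤ m ∧ spfSpec k m = m)) :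
    spfSpec (k + 1) m = spfSpec k m := by
  by_cases hf : 2 ≤ m ∧ ¬ m.Prime ∧ m.minFac < k
  · rw [spfSpec_fires hf, spfSpec_fires ⟨hf.1, hf.2.1, by omega⟩]
  · have hm : spfSpec k m = m := if_neg hf
    rw [hm]
    unfold spfSpec
    rw [if_neg]
    rintro ⟨h2m, hnp, hlt⟩
    have hne : ¬ m.minFac < k := fun hl => hf ⟨h2m, hnp, hl⟩
    have heq : m.minFac = k := by omega
    refine h ⟨heq ▸ Nat.minFac_dvd m, ?_, hm⟩
    have := Nat.minFac_sq_le_self (by omega : 0 < m) hnp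
    calc k * k = m.minFac ^ 2 := by rw [heq]; ring
      _ ≤ m := this

theorem spfSpec_succ_notprime {k m : Nat} (h : ¬ k.Prime) :
    spfSpec (k + 1) m = spfSpec k m := by
  unfold spfSpec
  by_cases hf : 2 ≤ m ∧ ¬ m.Prime ∧ m.minFac < k
  · rw [if_pos hf, if_pos ⟨hf.1, hf.2.1, by omega⟩]
  · rw [if_neg hf, if_neg]
    rintro ⟨h2m, hnp, hlt⟩
    have hpf : m.minFac.Prime := Nat.minFac_prime (by omega : m ≠ 1)
    have : m.minFac ≠ k := fun he => h (he ▸ hpf)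
    exact hf ⟨h2m, hnp, by omega⟩

theorem epB_sieveMark_spec (fuel : Nat) : ∀ (i j N : Nat) (spf : List Nat),
    1 ≤ i → N ≤ fuel + j → spf.length = N →
    (epB_sieveMark fuel i j N spf).length = N ∧
    (∀ m, (epB_sieveMark fuel i j N spf)[m]? =
      if j ≤ m ∧ m < N ∧ i ∣ (m - j) ∧ spf.getD m 0 = m then some i else spf[m]?) := by
  induction fuel with
  | zero =>
    intro i j N spf hi hb hlen
    refine ⟨hlen, fun m => ?_⟩
    rw [if_neg (by rintro ⟨h1, h2, _⟩; omega)]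
    rfl
  | succ f ih =>
    intro i j N spf hi hb hlen
    by_cases hj : j < N
    · have he : epB_sieveMark (f + 1) i j N spf =
          epB_sieveMark f i (j + i) N (if spf.getD j 0 = j then spf.set j i else spf) := by
        simp only [epB_sieveMark]; rw [if_pos hj]
      rw [he]
      have hlen' : (if spf.getD j 0 = j then spf.set j i else spf).length = N := by
        split <;> simp [hlen]
      obtain ⟨ihl, ihg⟩ := ih i (j + i) N _ hi (by omega) hlen'
      have hget : ∀ m, m ≠ j →
          (if spf.getD j 0 = j then spf.set j i else spf)[m]? = spf[m]? := by
        intro m hm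
        split
        · rw [List.getElem?_set, if_neg (fun h => hm h.symm)]
        · rfl
      have hgetD : ∀ m, m ≠ j →
          (if spf.getD j 0 = j then spf.set j i else spf).getD m 0 = spf.getD m 0 := by
        intro m hm
        rw [List.getD_eq_getElem?_getD, hget m hm, ← List.getD_eq_getElem?_getD]
      have hcond : ∀ m, m ≠ j →
          ((j ≤ m ∧ m < N ∧ i ∣ (m - j) ∧ spf.getD m 0 = m) ↔
           (j + i ≤ m ∧ m < N ∧ i ∣ (m - (j + i)) ∧ spf.getD m 0 = m)) := by
        intro m hm
        constructor
        · rintro ⟨h1, h2, h3, h4⟩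
          have hge : i ≤ m - j := Nat.le_of_dvd (by omega) h3
          refine ⟨by omega, h2, ?_, h4⟩
          have heq : m - (j + i) = (m - j) - i := by omega
          rw [heq]
          exact Nat.dvd_sub h3 dvd_rfl
        · rintro ⟨h1, h2, h3, h4⟩
          refine ⟨by omega, h2, ?_, h4⟩
          have heq : m - j = (m - (j + i)) + i := by omega
          rw [heq]
          exact Nat.dvd_add h3 dvd_rfl
      refine ⟨ihl, fun m => ?_⟩
      rw [ihg m]
      by_cases hm : m = j
      · subst hm
        rw [if_neg (by rintro ⟨h1, _, _, _⟩; omega)]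
        have hRC : (m ≤ m ∧ m < N ∧ i ∣ m - m ∧ spf.getD m 0 = m) ↔ spf.getD m 0 = m :=
          ⟨fun h => h.2.2.2, fun h => ⟨le_rfl, hj, by simp, h⟩⟩
        by_cases hc : spf.getD m 0 = m
        · rw [if_pos (hRC.mpr hc), if_pos hc, List.getElem?_set, if_pos rfl,
            if_pos (show m < spf.length by omega)]
        · rw [if_neg (fun h => hc (hRC.mp h)), if_neg hc]
      · rw [hgetD m hm, hget m hm]
        by_cases hc : j ≤ m ∧ m < N ∧ i ∣ (m - j) ∧ spf.getD m 0 = m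
        · rw [if_pos ((hcond m hm).mp hc), if_pos hc]
        · rw [if_neg (fun h => hc ((hcond m hm).mpr h)), if_neg hc]
    · have he : epB_sieveMark (f + 1) i j N spf = spf := by
        simp only [epB_sieveMark]; rw [if_neg hj]
      rw [he]
      refine ⟨hlen, fun m => ?_⟩
      rw [if_neg (by rintro ⟨h1, h2, _⟩; omega)]

-- B's fold invariant
def epInvB (nn k : Nat) (st : List Nat × List Int × List (Int × Int)) : Prop :=
  st.1.length = nn + 1 ∧
  (∀ m, m ≤ nn → st.1[m]? = some (spfSpec k m)) ∧
  st.2.1 = (epPrimesUpto (k - 2)).map Int.ofNat ∧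
  st.2.2 = epIdx (epPrimesUpto (k - 2))

theorem epB_step_inv {nn k : Nat} {st : List Nat × List Int × List (Int × Int)}
    (hinv : epInvB nn k st) (h2 : 2 ≤ k) (hk : k ≤ nn) :
    epInvB nn (k + 1) (epB_step (nn + 1) st k) := by
  obtain ⟨spf, primes, idx⟩ := st
  obtain ⟨hlen, hspf, hprimes, hidx⟩ := hinv
  dsimp only at hlen hspf hprimes hidx
  have hgetD : ∀ m, m ≤ nn → spf.getD m 0 = spfSpec k m := by
    intro m hm
    rw [List.getD_eq_getElem?_getD, hspf m hm]; rfl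
  have hguard : spf.getD k 0 = spfSpec k k := hgetD k hk
  have hksub : k + 1 - 2 = k - 1 := by omega
  by_cases hkp : Nat.Prime k
  · have hg : spf.getD k 0 = k := by rw [hguard, (spfSpec_self_iff h2).mpr hkp]
    obtain ⟨hml, hmg⟩ :=
      epB_sieveMark_spec (nn + 1) k (k * k) (nn + 1) spf (by omega) (by omega) hlen
    have hup : epPrimesUpto (k - 1) = epPrimesUpto (k - 2) ++ [k] := by
      rw [epPrimesUpto_succ h2, if_pos hkp]
    have hcnd : ∀ m, m ≤ nn →
        ((k * k ≤ m ∧ m < nn + 1 ∧ k ∣ m - k * k ∧ spf.getD m 0 = m) ↔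
         (k ∣ m ∧ k * k ≤ m ∧ spfSpec k m = m)) := by
      intro m hm
      rw [hgetD m hm]
      constructor
      · rintro ⟨ha, hb, hc, hd⟩
        refine ⟨?_, ha, hd⟩
        have heq : m = (m - k * k) + k * k := by omega
        rw [heq]
        exact Nat.dvd_add hc (dvd_mul_left k k)
      · rintro ⟨ha, hb, hd⟩
        exact ⟨hb, by omega, Nat.dvd_sub ha (dvd_mul_left k k), hd⟩
    simp only [epB_step]
    rw [if_pos hg]
    unfold epInvB
    dsimp only
    refine ⟨hml, ?_, ?_, ?_⟩
    · intro m hm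
      rw [hmg m]
      by_cases hc : k ∣ m ∧ k * k ≤ m ∧ spfSpec k m = m
      · rw [if_pos ((hcnd m hm).mpr hc), spfSpec_succ_marked h2 hc.1 hc.2.1 hc.2.2]
      · rw [if_neg (fun h => hc ((hcnd m hm).mp h)), hspf m hm,
          spfSpec_succ_unmarked h2 hc]
    · rw [hksub, hup, List.map_append, hprimes]; rfl
    · rw [hksub, hup, epIdx_append, hidx, hprimes]
      simp
  · have hg : ¬ spf.getD k 0 = k := by
      rw [hguard]
      exact fun h => hkp ((spfSpec_self_iff h2).mp h)
    have hup : epPrimesUpto (k - 1) = epPrimesUpto (k - 2) := by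
      rw [epPrimesUpto_succ h2, if_neg hkp, List.append_nil]
    simp only [epB_step]
    rw [if_neg hg]
    refine ⟨hlen, ?_, by rw [hksub, hup]; exact hprimes, by rw [hksub, hup]; exact hidx⟩
    intro m hm
    rw [hspf m hm, spfSpec_succ_notprime hkp]

theorem epB_fold_inv (nn : Nat) : ∀ (t : Nat), 2 + t ≤ nn + 1 →
    epInvB nn (2 + t) ((List.range' 2 t).foldl (epB_step (nn + 1))
      (List.range (nn + 1), ([] : List Int), ([] : List (Int × Int)))) := by
  intro t
  induction t with
  | zero =>
    intro _
    simp only [List.range', List.foldl_nil]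
    refine ⟨by simp, ?_, by simp [epPrimesUpto], by simp [epIdx, epPrimesUpto]⟩
    intro m hm
    dsimp only
    rw [List.getElem?_range (by omega)]
    have : spfSpec 2 m = m := by
      unfold spfSpec
      rw [if_neg]
      rintro ⟨h2m, hnp, hlt⟩
      have := (Nat.minFac_prime (by omega : m ≠ 1)).two_le
      omega
    rw [this]
  | succ t ih =>
    intro ht
    have h1t : 2 + 1 * t = 2 + t := by omega
    rw [List.range'_concat, List.foldl_append, List.foldl_cons, List.foldl_nil, h1t]
    exact epB_step_inv (ih (by omega)) (show 2 ≤ 2 + t by omega) (show 2 + t ≤ nn by omega)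

theorem epB_lastLoop_one (fuel : Nat) (spf : List Nat) (last : Nat) :
    epB_lastLoop fuel spf 1 last = last := by
  cases fuel <;> simp [epB_lastLoop]

theorem epB_lastLoop_spec {nn : Nat} {spf : List Nat}
    (htab : ∀ q, q ≤ nn → spf.getD q 0 = spfSpec (nn + 1) q) :
    ∀ (fuel m last : Nat), 2 ≤ m → m ≤ nn → m ≤ fuel →
    epMPF m (epB_lastLoop fuel spf m last) := by
  intro fuel
  induction fuel with
  | zero => intro m last h2 _ hf; omega
  | succ f ih =>
    intro m last h2 hm hf
    have hs : spf.getD m 0 = spfSpec (nn + 1) m := htab m hm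
    simp only [epB_lastLoop]
    rw [if_pos (by omega : 1 < m)]
    by_cases hmp : m.Prime
    · have hsm : spf.getD m 0 = m := by
        rw [hs]; unfold spfSpec; rw [if_neg (fun h => h.2.1 hmp)]
      rw [hsm, Nat.div_self (by omega : 0 < m), epB_lastLoop_one]
      exact ⟨hmp, dvd_rfl, fun p hp hpd => Nat.le_of_dvd (by omega) hpd⟩
    · have hpf : m.minFac.Prime := Nat.minFac_prime (by omega : m ≠ 1)
      have hfd : m.minFac ∣ m := Nat.minFac_dvd m
      have hflt : m.minFac < m := minFac_lt_of_composite h2 hmp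
      have hsm : spf.getD m 0 = m.minFac := by
        rw [hs]
        exact spfSpec_fires ⟨h2, hmp, by have := Nat.minFac_le (by omega : 0 < m); omega⟩
      have hsq := Nat.minFac_sq_le_self (by omega : 0 < m) hmp
      have hq2 : 2 ≤ m / m.minFac := by
        have : m.minFac ≤ m / m.minFac :=
          (Nat.le_div_iff_mul_le (by have := hpf.two_le; omega)).mpr (by nlinarith)
        have := hpf.two_le
        omega
      have hqlt : m / m.minFac < m := Nat.div_lt_self (by omega) hpf.one_lt
      obtain ⟨hrp, hrd, hrmax⟩ :=
        ih (m / m.minFac) m.minFac hq2 (by omega) (by omega)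
      have hquot : m.minFac * (m / m.minFac) = m := Nat.mul_div_cancel' hfd
      rw [hsm]
      have hrdm : epB_lastLoop f spf (m / m.minFac) m.minFac ∣ m :=
        hrd.trans (Nat.div_dvd_of_dvd hfd)
      refine ⟨hrp, hrdm, ?_⟩
      intro p hp hpd
      have hminr : m.minFac ≤ epB_lastLoop f spf (m / m.minFac) m.minFac :=
        Nat.minFac_le_of_dvd hrp.two_le hrdm
      rw [← hquot] at hpd
      rcases hp.dvd_mul.mp hpd with h | h
      · have hpeq : p = m.minFac := (Nat.prime_dvd_prime_iff_eq hp hpf).mp h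
        omega
      · exact hrmax p hp h

-- final bridge: A's table entry is exactly B's per-element value
theorem epMaxPPF_final {nn j v r : Nat} (hj : j ≤ nn) (hv : epMaxPPF (nn + 1) j v)
    (hr : 2 ≤ j → epMPF j r) :
    (v : Int) = if j < 2 then (j : Int) else (r : Int) := by
  by_cases hj2 : j < 2
  · rw [if_pos hj2]
    rcases hv with ⟨hvp, _, hvj, _, _⟩ | ⟨rfl, _⟩
    · have := hvp.two_le; omega
    · rfl
  · rw [if_neg hj2]
    have h2j : 2 ≤ j := by omega
    obtain ⟨hrp, hrd, hrmax⟩ := hr h2j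
    by_cases hjp : j.Prime
    · have hreq : r = j := by
        rcases hjp.eq_one_or_self_of_dvd _ hrd with h | h
        · have := hrp.two_le; omega
        · exact h
      rcases hv with ⟨hvp, hvd, hvj, _, _⟩ | ⟨rfl, _⟩
      · rcases hjp.eq_one_or_self_of_dvd _ hvd with h | h
        · have := hvp.two_le; omega
        · omega
      · rw [hreq]
    · rcases hv with ⟨hvp, hvd, hvj, _, hmax⟩ | ⟨rfl, hnone⟩
      · have hrj : r < j := by
          rcases lt_or_eq_of_le (Nat.le_of_dvd (by omega) hrd) with h | h
          · exact h
          · exact absurd (h ▸ hrp) hjp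
        have h1 : r ≤ v := hmax _ (by omega) hrp hrd hrj
        have h2 : v ≤ r := hrmax v hvp hvd
        omega
      · obtain ⟨p, hp, hpd, hplt⟩ := notPrime_exists h2j hjp
        exact absurd ⟨hpd, hplt⟩ (hnone p (by omega) hp)

-- ===== VERDICT (by name: the statement is the Claim_ definition above) =====
theorem enumerate_prime_spec : Claim_equal_enumerate_prime := by
  intro n _ hpre
  unfold Pre_enumerate_prime at hpre
  unfold Spec_enumerate_prime enumerate_prime enumerate_prime_alt
  dsimp only
  have h1 : 1 ≤ n.toNat := by omega
  have hN : (n + 1).toNat = n.toNat + 1 := by omega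
  rw [hN]
  have h2 : n.toNat + 1 - 2 = n.toNat - 1 := by omega
  rw [h2]
  have hinv := epA_fold_inv n.toNat (n.toNat - 1) (by omega)
  have hinvB := epB_fold_inv n.toNat (n.toNat - 1) (by omega)
  have h3 : 2 + (n.toNat - 1) = n.toNat + 1 := by omega
  rw [h3] at hinv hinvB
  obtain ⟨hlen, hlis, hprimes, hidx, hdlen, hdiv, hcnt⟩ := hinv
  obtain ⟨hblen, hbspf, hbprimes, hbidx⟩ := hinvB
  have hup2 : n.toNat + 1 - 2 = n.toNat - 1 := by omega
  have htab : ∀ q, q ≤ n.toNat →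
      ((List.range' 2 (n.toNat - 1)).foldl (epB_step (n.toNat + 1))
        (List.range (n.toNat + 1), ([] : List Int), ([] : List (Int × Int)))).1.getD q 0 =
        spfSpec (n.toNat + 1) q := by
    intro q hq
    rw [List.getD_eq_getElem?_getD, hbspf q hq]; rfl
  simp only [Prod.mk.injEq]
  refine ⟨?_, ?_, ?_⟩
  · rw [hprimes, hbprimes, hup2]
  · rw [hidx, hbidx, hup2]
  · apply List.ext_getElem?
    intro j
    by_cases hj : j ≤ n.toNat
    · obtain ⟨v, hv, hvp⟩ := hdiv j hj
      rw [hv, List.getElem?_map, List.getElem?_range (by omega)]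
      exact congrArg some
        (epMaxPPF_final hj hvp (fun h2j => epB_lastLoop_spec htab j j 0 h2j hj le_rfl))
    · rw [List.getElem?_eq_none (by omega), List.getElem?_eq_none (by simp; omega)]

@[simp] theorem enumerate_prime_raises : Claim_raises_enumerate_prime := by
  unfold Claim_raises_enumerate_prime
  constructor
  · intro n _ hr hp
    exact absurd hp (by unfold Pre_enumerate_prime Raises_enumerate_prime at *; omega)
  · refine ⟨by decide, by decide, by decide⟩
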